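-- pv_equiv track=rewrite | github.com/ScrollPrize/villa | vesuvius/src/vesuvius/neural_tracing/datasets/common.py | _has_consecutive_wrap_ids
-- ===== SOURCE A (Python) =====
-- def _has_consecutive_wrap_ids(left_ids, right_ids):
--     if not left_ids or not right_ids:
--         return False
--     right_set = set(right_ids)
--     for wrap_id in left_ids:
--         if (wrap_id - 1) in right_set or (wrap_id + 1) in right_set:
--             return True
--     return False
-- ===== SOURCE B (Python) =====
-- def _has_consecutive_wrap_ids(left_ids, right_ids):
--     ls = sorted(set(left_ids))
--     rs = sorted(set(right_ids))
--     i = j = 0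
--     while i < len(ls) and j < len(rs):
--         a, b = ls[i], rs[j]
--         if b == a + 1 or a == b + 1:
--             return True
--         if a < b:
--             i += 1
--         elif b < a:
--             j += 1
--         else:
--             # a == b: the only remaining partner for this value is a+1,
--             # which (lists strictly increasing) can only be the next element
--             if (i + 1 < len(ls) and ls[i + 1] == a + 1) or \
--                (j + 1 < len(rs) and rs[j + 1] == a + 1):
--                 return True
--             i += 1
--             j += 1
--     return False
-- ===== Notes on version B (the rewrite author's own statement) =====
-- stated objective: alternative
-- what changed: Replaces A's hash-set build plus per-left-element membership probes (w-1/w+1 in right_set) by sorting and deduplicating both lists and running a single two-pointer merge scan that advances the smaller head and detects a difference-1 pair (with a one-step lookahead when heads are equal); trades hashing for O(n log n) sorting.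
import Mathlib
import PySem

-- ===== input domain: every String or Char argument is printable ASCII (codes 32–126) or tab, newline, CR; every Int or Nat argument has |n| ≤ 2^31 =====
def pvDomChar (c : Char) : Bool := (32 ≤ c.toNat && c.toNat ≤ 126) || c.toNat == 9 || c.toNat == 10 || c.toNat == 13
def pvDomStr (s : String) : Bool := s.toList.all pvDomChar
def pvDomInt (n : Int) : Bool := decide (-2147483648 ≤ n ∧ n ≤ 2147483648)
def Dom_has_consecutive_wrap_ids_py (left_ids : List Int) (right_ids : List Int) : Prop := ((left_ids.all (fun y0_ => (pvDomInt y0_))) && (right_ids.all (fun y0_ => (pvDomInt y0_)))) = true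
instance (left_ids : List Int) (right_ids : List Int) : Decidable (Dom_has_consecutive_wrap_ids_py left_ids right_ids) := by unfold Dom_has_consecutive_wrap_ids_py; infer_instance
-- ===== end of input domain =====

-- B replaces A's hash-set membership probing by sort-and-deduplicate both lists then a two-pointer merge scan (alternative).

-- ===== PORT A =====
-- the 'for wrap_id in left_ids: … return True' loop with early exit
def hcwLoop (right_set : PySem.Set Int) : List Int → Bool
  | [] => false
  | w :: rest =>
      if right_set.contains (w - 1) || right_set.contains (w + 1) then true
      else hcwLoop right_set rest

def has_consecutive_wrap_ids_py (left_ids : List Int) (right_ids : List Int) : Bool :=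
  if left_ids.isEmpty || right_ids.isEmpty then false
  else hcwLoop (PySem.Set.ofList right_ids) left_ids

-- ===== PORT B =====
-- the 'while i < len(ls) and j < len(rs): …' two-pointer loop, as recursion on the two suffixes
def tpLoop : List Int → List Int → Bool
  | [], _ => false
  | _ :: _, [] => false
  | a :: as, b :: bs =>
      if b == a + 1 || a == b + 1 then true
      else if a < b then tpLoop as (b :: bs)
      else if b < a then tpLoop (a :: as) bs
      else
        -- a == b: the only remaining partner for this value is a+1, the next element of either list
        if (match as with | x :: _ => x == a + 1 | [] => false) ||
           (match bs with | y :: _ => y == a + 1 | [] => false) then true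
        else tpLoop as bs
termination_by l r => l.length + r.length

def has_consecutive_wrap_ids_py_alt (left_ids : List Int) (right_ids : List Int) : Bool :=
  let ls := PySem.List.sorted (PySem.Set.ofList left_ids) (fun x => x) false
  let rs := PySem.List.sorted (PySem.Set.ofList right_ids) (fun x => x) false
  tpLoop ls rs

-- ===== PRECONDITION & SPEC =====
def Spec_has_consecutive_wrap_ids_py (left_ids : List Int) (right_ids : List Int) (out : Bool) : Prop := out = has_consecutive_wrap_ids_py_alt left_ids right_ids
instance (left_ids : List Int) (right_ids : List Int) (out : Bool) : Decidable (Spec_has_consecutive_wrap_ids_py left_ids right_ids out) := by unfold Spec_has_consecutive_wrap_ids_py; infer_instance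

-- ===== CLAIM (what is proved, stated in full; the proofs are below) =====
def Claim_equal_has_consecutive_wrap_ids_py : Prop := ∀ (left_ids : List Int) (right_ids : List Int), Dom_has_consecutive_wrap_ids_py left_ids right_ids → Spec_has_consecutive_wrap_ids_py left_ids right_ids (has_consecutive_wrap_ids_py left_ids right_ids)

-- ===== LEMMAS AND PROOFS =====

lemma hcwLoop_eq_any (s : PySem.Set Int) (l : List Int) :
    hcwLoop s l = l.any (fun w => s.contains (w - 1) || s.contains (w + 1)) := by
  induction l with
  | nil => rfl
  | cons w rest ih => simp [hcwLoop, ih]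

lemma A_iff (l r : List Int) :
    has_consecutive_wrap_ids_py l r = true ↔ ∃ w ∈ l, (w - 1) ∈ r ∨ (w + 1) ∈ r := by
  unfold has_consecutive_wrap_ids_py
  rcases l with _ | ⟨a, l'⟩ <;> rcases r with _ | ⟨b, r'⟩ <;>
    simp [hcwLoop_eq_any, PySem.Set.mem_ofList]

-- two-pointer scan on strictly increasing lists finds a ±1 pair iff one exists
lemma tpLoop_iff : ∀ (L R : List Int), L.Pairwise (· < ·) → R.Pairwise (· < ·) →
    (tpLoop L R = true ↔ ∃ a ∈ L, ∃ b ∈ R, b = a + 1 ∨ a = b + 1) := by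
  intro L R
  induction L, R using tpLoop.induct with
  | case1 R => simp [tpLoop]
  | case2 a as => simp [tpLoop]
  | case3 a as b bs hmatch =>
      intro _ _
      rw [tpLoop.eq_def]; dsimp only
      rw [if_pos hmatch]
      exact ⟨fun _ => ⟨a, List.mem_cons_self, b, List.mem_cons_self, by simpa using hmatch⟩,
             fun _ => rfl⟩
  | case4 a as b bs hmatch hlt ih =>
      intro hL hR
      have hnm : ¬ (b = a + 1 ∨ a = b + 1) := by simpa using hmatch
      push Not at hnm
      have hRge : ∀ y ∈ b :: bs, b ≤ y := by
        intro y hy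
        rcases List.mem_cons.1 hy with rfl | hy
        · exact le_refl _
        · exact le_of_lt ((List.pairwise_cons.1 hR).1 y hy)
      rw [tpLoop.eq_def]; dsimp only
      rw [if_neg hmatch, if_pos hlt,
        ih (List.pairwise_cons.1 hL).2 hR]
      constructor
      · rintro ⟨x, hx, y, hy, hxy⟩; exact ⟨x, List.mem_cons_of_mem _ hx, y, hy, hxy⟩
      · rintro ⟨x, hx, y, hy, hxy⟩
        rcases List.mem_cons.1 hx with rfl | hx
        · exfalso
          have hby := hRge y hy
          obtain ⟨h1, h2⟩ := hnm
          rcases hxy with rfl | rfl <;> omega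
        · exact ⟨x, hx, y, hy, hxy⟩
  | case5 a as b bs hmatch hlt hgt ih =>
      intro hL hR
      have hnm : ¬ (b = a + 1 ∨ a = b + 1) := by simpa using hmatch
      push Not at hnm
      rw [tpLoop.eq_def]; dsimp only
      rw [if_neg hmatch, if_neg hlt, if_pos hgt, ih hL (List.pairwise_cons.1 hR).2]
      constructor
      · rintro ⟨x, hx, y, hy, hxy⟩; exact ⟨x, hx, y, List.mem_cons_of_mem _ hy, hxy⟩
      · rintro ⟨x, hx, y, hy, hxy⟩
        rcases List.mem_cons.1 hy with rfl | hy
        · exfalso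
          obtain ⟨h1, h2⟩ := hnm
          rcases List.mem_cons.1 hx with rfl | hx
          · rcases hxy with rfl | rfl <;> omega
          · have hltx : a < x := (List.pairwise_cons.1 hL).1 x hx
            rcases hxy with rfl | rfl <;> omega
        · exact ⟨x, hx, y, hy, hxy⟩
  | case6 a as b bs hmatch hlt hgt hnext =>
      intro _ _
      have heq : a = b := by omega
      rw [tpLoop.eq_def]; dsimp only
      rw [if_neg hmatch, if_neg hlt, if_neg hgt, if_pos hnext]
      refine ⟨fun _ => ?_, fun _ => rfl⟩
      have hnext' := hnext
      rw [Bool.or_eq_true] at hnext'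
      rcases hnext' with hx | hy
      · rcases as with _ | ⟨x, as'⟩
        · simp at hx
        · simp only [beq_iff_eq] at hx
          exact ⟨x, List.mem_cons_of_mem _ List.mem_cons_self, b, List.mem_cons_self,
            Or.inr (by omega)⟩
      · rcases bs with _ | ⟨y, bs'⟩
        · simp at hy
        · simp only [beq_iff_eq] at hy
          exact ⟨a, List.mem_cons_self, y, List.mem_cons_of_mem _ List.mem_cons_self,
            Or.inl (by omega)⟩
  | case7 a as b bs hmatch hlt hgt hnext ih =>
      intro hL hR
      have heq : a = b := by omega
      have hnm : ¬ (b = a + 1 ∨ a = b + 1) := by simpa using hmatch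
      push Not at hnm
      have hasl : ∀ x ∈ as, a < x := (List.pairwise_cons.1 hL).1
      have hbsl : ∀ y ∈ bs, b < y := (List.pairwise_cons.1 hR).1
      have hasn : (a + 1) ∉ as := by
        intro hmem
        rcases as with _ | ⟨x, as'⟩
        · simp at hmem
        · have hxne : x ≠ a + 1 := by
            intro h; exact hnext (by simp [h])
          rcases List.mem_cons.1 hmem with h | h
          · exact hxne h.symm
          · have h1 : a < x := hasl x List.mem_cons_self
            have h2 : x < a + 1 := (List.pairwise_cons.1 (List.pairwise_cons.1 hL).2).1 _ h
            omega
      have hbsn : (b + 1) ∉ bs := by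
        intro hmem
        rcases bs with _ | ⟨y, bs'⟩
        · simp at hmem
        · have hyne : y ≠ a + 1 := by
            intro h; exact hnext (by simp [h])
          rcases List.mem_cons.1 hmem with h | h
          · exact hyne (by omega)
          · have h1 : b < y := hbsl y List.mem_cons_self
            have h2 : y < b + 1 := (List.pairwise_cons.1 (List.pairwise_cons.1 hR).2).1 _ h
            omega
      rw [tpLoop.eq_def]; dsimp only
      rw [if_neg hmatch, if_neg hlt, if_neg hgt, if_neg hnext,
        ih (List.pairwise_cons.1 hL).2 (List.pairwise_cons.1 hR).2]
      constructor
      · rintro ⟨x, hx, y, hy, hxy⟩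
        exact ⟨x, List.mem_cons_of_mem _ hx, y, List.mem_cons_of_mem _ hy, hxy⟩
      · rintro ⟨x, hx, y, hy, hxy⟩
        rcases List.mem_cons.1 hx with rfl | hx <;> rcases List.mem_cons.1 hy with rfl | hy
        · omega
        · exfalso
          have h1 := hbsl y hy
          rcases hxy with rfl | rfl
          · exact hbsn (by simpa [heq] using hy)
          · omega
        · exfalso
          have h1 := hasl x hx
          rcases hxy with rfl | rfl
          · omega
          · exact hasn (by simpa [← heq] using hx)
        · exact ⟨x, hx, y, hy, hxy⟩

lemma B_iff (l r : List Int) :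
    has_consecutive_wrap_ids_py_alt l r = true ↔ ∃ w ∈ l, (w - 1) ∈ r ∨ (w + 1) ∈ r := by
  unfold has_consecutive_wrap_ids_py_alt
  rw [tpLoop_iff _ _ (PySem.List.sorted_ofList_pairwise_lt l) (PySem.List.sorted_ofList_pairwise_lt r)]
  simp only [PySem.List.mem_sorted, PySem.Set.mem_ofList]
  constructor
  · rintro ⟨a, ha, b, hb, rfl | rfl⟩
    · exact ⟨a, ha, Or.inr hb⟩
    · exact ⟨b + 1, ha, Or.inl (by simpa using hb)⟩
  · rintro ⟨w, hw, hm | hm⟩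
    · exact ⟨w, hw, w - 1, hm, Or.inr (by ring)⟩
    · exact ⟨w, hw, w + 1, hm, Or.inl rfl⟩

-- ===== VERDICT (by name: the statement is the Claim_ definition above) =====
theorem has_consecutive_wrap_ids_py_spec : Claim_equal_has_consecutive_wrap_ids_py := by
  intro l r _
  unfold Spec_has_consecutive_wrap_ids_py
  rcases hB : has_consecutive_wrap_ids_py_alt l r with _ | _
  · rcases hA : has_consecutive_wrap_ids_py l r with _ | _
    · rfl
    · exact absurd ((B_iff l r).2 ((A_iff l r).1 hA)) (by simp [hB])
  · exact (A_iff l r).2 ((B_iff l r).1 hB)
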